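-- pv_equiv track=rewrite | github.com/SBPHP/content-gap-analyzer-v2 | content-gap-analyzer.py | _reddit_to_topic
-- ===== SOURCE A (Python) =====
-- def _reddit_to_topic(reddit_text: str) -> str:
--     """Convert Reddit question to blog post title"""
--     text = reddit_text.strip()
--     text_lower = text.lower()
--
--     # Specific patterns for common topics
--     if 'seedbox' in text_lower:
--         if any(word in text_lower for word in ['slow', 'speed']):
--             return "How to Fix Slow Seedbox Performance: Complete Troubleshooting Guide"
--         elif any(word in text_lower for word in ['best', 'recommend']):
--             return "Best Seedbox Providers: Complete Comparison Guide 2025"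
--         elif 'plex' in text_lower:
--             return "Seedbox + Plex Setup: Complete Media Server Guide"
--         else:
--             return "Ultimate Seedbox Guide: Everything You Need to Know"
--
--     elif any(word in text_lower for word in ['plex', 'media server']):
--         if 'mini pc' in text_lower:
--             return "Best Mini PC for Plex Server: Complete Hardware Guide 2025"
--         elif 'power' in text_lower:
--             return "Most Power-Efficient Plex Server Setup Guide"
--         else:
--             return "Complete Plex Media Server Setup Guide"
--
--     elif 'vpn' in text_lower:
--         if 'best' in text_lower:
--             return "Best VPN for Torrenting: Complete Privacy Guide 2025"
--         else:
--             return "Complete VPN Guide for Privacy and Security"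
--
--     # Generic patterns
--     if text_lower.startswith('how to'):
--         return f"Complete Guide: {text}"
--     elif text_lower.startswith('what is'):
--         topic = text[7:].strip()  # Remove "what is"
--         return f"Complete Guide to {topic}"
--     elif text_lower.startswith('best'):
--         return f"{text} - Complete Guide 2025"
--     elif '?' in text:
--         clean_text = text.replace('?', '').strip()
--         return f"Complete Guide: {clean_text}"
--     else:
--         return f"Ultimate Guide: {text[:60]}..."
-- ===== SOURCE B (Python) =====
-- # Flattened ordered rule table (all-of/any-of substring matching) instead of nested if/elif trees.
-- _CATEGORY_RULES = [
--     # (all_of substrings, any_of substrings (empty = no constraint), title)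
--     (['seedbox'], ['slow', 'speed'], "How to Fix Slow Seedbox Performance: Complete Troubleshooting Guide"),
--     (['seedbox'], ['best', 'recommend'], "Best Seedbox Providers: Complete Comparison Guide 2025"),
--     (['seedbox'], ['plex'], "Seedbox + Plex Setup: Complete Media Server Guide"),
--     (['seedbox'], [], "Ultimate Seedbox Guide: Everything You Need to Know"),
--     (['mini pc'], ['plex', 'media server'], "Best Mini PC for Plex Server: Complete Hardware Guide 2025"),
--     (['power'], ['plex', 'media server'], "Most Power-Efficient Plex Server Setup Guide"),
--     ([], ['plex', 'media server'], "Complete Plex Media Server Setup Guide"),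
--     (['vpn', 'best'], [], "Best VPN for Torrenting: Complete Privacy Guide 2025"),
--     (['vpn'], [], "Complete VPN Guide for Privacy and Security"),
-- ]
--
--
-- def _reddit_to_topic(reddit_text: str) -> str:
--     text = reddit_text.strip()
--     low = text.lower()
--
--     for all_of, any_of, title in _CATEGORY_RULES:
--         if all(w in low for w in all_of) and (not any_of or any(w in low for w in any_of)):
--             return title
--
--     if low.startswith('how to'):
--         return "Complete Guide: " + text
--     if low.startswith('what is'):
--         return "Complete Guide to " + text[7:].strip()
--     if low.startswith('best'):
--         return text + " - Complete Guide 2025"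
--     if '?' in text:
--         return "Complete Guide: " + text.replace('?', '').strip()
--     return "Ultimate Guide: " + text[:60] + "..."
-- ===== Notes on version B (the rewrite author's own statement) =====
-- stated objective: simpler
-- what changed: Replaces A's nested if/elif trees for the category titles with a single flat ordered rule table of (all-of, any-of substrings, title) triples scanned once, followed by a short prefix/fallback chain.
import Mathlib
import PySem

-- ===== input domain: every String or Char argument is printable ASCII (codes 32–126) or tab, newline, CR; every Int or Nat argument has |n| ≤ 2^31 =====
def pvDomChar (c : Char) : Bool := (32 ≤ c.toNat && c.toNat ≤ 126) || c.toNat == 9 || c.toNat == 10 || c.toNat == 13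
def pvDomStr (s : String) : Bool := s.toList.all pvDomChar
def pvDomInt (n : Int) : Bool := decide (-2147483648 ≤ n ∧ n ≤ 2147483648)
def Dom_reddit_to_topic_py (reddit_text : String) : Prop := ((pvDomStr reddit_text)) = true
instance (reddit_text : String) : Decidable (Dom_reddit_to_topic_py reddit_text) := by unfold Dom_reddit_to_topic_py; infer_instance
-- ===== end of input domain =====

-- B replaces A's nested if/elif trees with one flat ordered rule table scanned once (objective: simpler).

-- ===== PORT A =====
def reddit_to_topic_py (reddit_text : String) : String :=
  let text := PySem.Str.strip reddit_text
  let tl := PySem.Str.lower text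
  if PySem.Str.isIn "seedbox" tl then
    if ["slow", "speed"].any (fun w => PySem.Str.isIn w tl) then
      "How to Fix Slow Seedbox Performance: Complete Troubleshooting Guide"
    else if ["best", "recommend"].any (fun w => PySem.Str.isIn w tl) then
      "Best Seedbox Providers: Complete Comparison Guide 2025"
    else if PySem.Str.isIn "plex" tl then
      "Seedbox + Plex Setup: Complete Media Server Guide"
    else
      "Ultimate Seedbox Guide: Everything You Need to Know"
  else if ["plex", "media server"].any (fun w => PySem.Str.isIn w tl) then
    if PySem.Str.isIn "mini pc" tl then
      "Best Mini PC for Plex Server: Complete Hardware Guide 2025"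
    else if PySem.Str.isIn "power" tl then
      "Most Power-Efficient Plex Server Setup Guide"
    else
      "Complete Plex Media Server Setup Guide"
  else if PySem.Str.isIn "vpn" tl then
    if PySem.Str.isIn "best" tl then
      "Best VPN for Torrenting: Complete Privacy Guide 2025"
    else
      "Complete VPN Guide for Privacy and Security"
  else if PySem.Str.startswith tl "how to" then
    "Complete Guide: " ++ text
  else if PySem.Str.startswith tl "what is" then
    "Complete Guide to " ++ PySem.Str.strip (PySem.Str.slice text (some 7) none)
  else if PySem.Str.startswith tl "best" then
    text ++ " - Complete Guide 2025"
  else if PySem.Str.isIn "?" text then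
    "Complete Guide: " ++ PySem.Str.strip (PySem.Str.replace text "?" "")
  else
    "Ultimate Guide: " ++ PySem.Str.slice text none (some 60) ++ "..."

-- ===== PORT B =====
def pvCategoryRules : List (List String × List String × String) :=
  [ (["seedbox"], ["slow", "speed"], "How to Fix Slow Seedbox Performance: Complete Troubleshooting Guide"),
    (["seedbox"], ["best", "recommend"], "Best Seedbox Providers: Complete Comparison Guide 2025"),
    (["seedbox"], ["plex"], "Seedbox + Plex Setup: Complete Media Server Guide"),
    (["seedbox"], [], "Ultimate Seedbox Guide: Everything You Need to Know"),
    (["mini pc"], ["plex", "media server"], "Best Mini PC for Plex Server: Complete Hardware Guide 2025"),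
    (["power"], ["plex", "media server"], "Most Power-Efficient Plex Server Setup Guide"),
    ([], ["plex", "media server"], "Complete Plex Media Server Setup Guide"),
    (["vpn", "best"], [], "Best VPN for Torrenting: Complete Privacy Guide 2025"),
    (["vpn"], [], "Complete VPN Guide for Privacy and Security") ]

def reddit_to_topic_py_alt (reddit_text : String) : String :=
  let text := PySem.Str.strip reddit_text
  let low := PySem.Str.lower text
  match pvCategoryRules.find? (fun r =>
      r.1.all (fun w => PySem.Str.isIn w low) &&
      (r.2.1.isEmpty || r.2.1.any (fun w => PySem.Str.isIn w low))) with
  | some r => r.2.2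
  | none =>
    if PySem.Str.startswith low "how to" then
      "Complete Guide: " ++ text
    else if PySem.Str.startswith low "what is" then
      "Complete Guide to " ++ PySem.Str.strip (PySem.Str.slice text (some 7) none)
    else if PySem.Str.startswith low "best" then
      text ++ " - Complete Guide 2025"
    else if PySem.Str.isIn "?" text then
      "Complete Guide: " ++ PySem.Str.strip (PySem.Str.replace text "?" "")
    else
      "Ultimate Guide: " ++ PySem.Str.slice text none (some 60) ++ "..."

-- ===== PRECONDITION & SPEC =====
def Spec_reddit_to_topic_py (reddit_text : String) (out : String) : Prop := out = reddit_to_topic_py_alt reddit_text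
instance (reddit_text : String) (out : String) : Decidable (Spec_reddit_to_topic_py reddit_text out) := by unfold Spec_reddit_to_topic_py; infer_instance

-- ===== CLAIM (what is proved, stated in full; the proofs are below) =====
def Claim_equal_reddit_to_topic_py : Prop := ∀ (reddit_text : String), Dom_reddit_to_topic_py reddit_text → Spec_reddit_to_topic_py reddit_text (reddit_to_topic_py reddit_text)

-- ===== LEMMAS AND PROOFS =====

-- Abstract form of the branch/table agreement: f is the "substring occurs in the lowered
-- stripped text" tester, gen the shared generic-pattern fallback result.
theorem pvRuleTable_eq (f : String → Bool) (gen : String) :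
    (if f "seedbox" then
       if ["slow", "speed"].any f then
         "How to Fix Slow Seedbox Performance: Complete Troubleshooting Guide"
       else if ["best", "recommend"].any f then
         "Best Seedbox Providers: Complete Comparison Guide 2025"
       else if f "plex" then
         "Seedbox + Plex Setup: Complete Media Server Guide"
       else
         "Ultimate Seedbox Guide: Everything You Need to Know"
     else if ["plex", "media server"].any f then
       if f "mini pc" then
         "Best Mini PC for Plex Server: Complete Hardware Guide 2025"
       else if f "power" then
         "Most Power-Efficient Plex Server Setup Guide"
       else
         "Complete Plex Media Server Setup Guide"
     else if f "vpn" then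
       if f "best" then
         "Best VPN for Torrenting: Complete Privacy Guide 2025"
       else
         "Complete VPN Guide for Privacy and Security"
     else gen)
    =
    (match pvCategoryRules.find? (fun r =>
        r.1.all (fun w => f w) && (r.2.1.isEmpty || r.2.1.any (fun w => f w))) with
     | some r => r.2.2
     | none => gen) := by
  cases hsb : f "seedbox"
  · cases hpl : f "plex"
    · cases hms : f "media server"
      · cases hmi : f "mini pc" <;> cases hpo : f "power" <;> cases hvp : f "vpn" <;>
          simp [pvCategoryRules, List.find?, hsb, hpl, hms, hmi, hpo, hvp] <;>
          cases hbe : f "best" <;> simp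
      · cases hmi : f "mini pc" <;> cases hpo : f "power" <;>
          simp [pvCategoryRules, List.find?, hsb, hpl, hms, hmi, hpo]
    · cases hmi : f "mini pc" <;> cases hpo : f "power" <;>
        simp [pvCategoryRules, List.find?, hsb, hpl, hmi, hpo]
  · cases hsl : f "slow"
    · cases hsp : f "speed"
      · cases hbe : f "best"
        · cases hre : f "recommend"
          · cases hpx : f "plex" <;>
              simp [pvCategoryRules, List.find?, hsb, hsl, hsp, hbe, hre, hpx]
          · simp [pvCategoryRules, List.find?, hsb, hsl, hsp, hbe, hre]
        · simp [pvCategoryRules, List.find?, hsb, hsl, hsp, hbe]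
      · simp [pvCategoryRules, hsb, hsl, hsp]
    · simp [pvCategoryRules, hsb, hsl]

-- ===== VERDICT (by name: the statement is the Claim_ definition above) =====
theorem reddit_to_topic_py_spec : Claim_equal_reddit_to_topic_py := by
  intro s _
  unfold Spec_reddit_to_topic_py reddit_to_topic_py reddit_to_topic_py_alt
  exact pvRuleTable_eq
    (fun w => PySem.Str.isIn w (PySem.Str.lower (PySem.Str.strip s)))
    (if PySem.Str.startswith (PySem.Str.lower (PySem.Str.strip s)) "how to" then
       "Complete Guide: " ++ PySem.Str.strip s
     else if PySem.Str.startswith (PySem.Str.lower (PySem.Str.strip s)) "what is" then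
       "Complete Guide to " ++ PySem.Str.strip (PySem.Str.slice (PySem.Str.strip s) (some 7) none)
     else if PySem.Str.startswith (PySem.Str.lower (PySem.Str.strip s)) "best" then
       PySem.Str.strip s ++ " - Complete Guide 2025"
     else if PySem.Str.isIn "?" (PySem.Str.strip s) then
       "Complete Guide: " ++ PySem.Str.strip (PySem.Str.replace (PySem.Str.strip s) "?" "")
     else
       "Ultimate Guide: " ++ PySem.Str.slice (PySem.Str.strip s) none (some 60) ++ "...")
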